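-- pv_equiv track=rewrite | github.com/krbjila/labrad_tools | sequencer/devices/lib/ad5791_ramps.py | combine_flat_ramps
-- ===== SOURCE A (Python) =====
-- def combine_flat_ramps(l, s):
--     if not l:
--         l = [s.pop(0)]
--     if s:
--         nxt = s.pop(0)
--         if nxt['dv'] == 0 and l[-1]['dv'] == 0:
--             l[-1]['dt'] += nxt['dt']
--             return combine_flat_ramps(l, s)
--         else:
--             return l + combine_flat_ramps([nxt], s)
--     else:
--         return l
-- ===== SOURCE B (Python) =====
-- def combine_flat_ramps(l, s):
--     # Iterative single pass; note: like A, pops s empty and mutates merged dicts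
--     # in place; equivalence is about the return value.
--     if not l:
--         l = [s.pop(0)]
--     result = list(l)
--     while s:
--         nxt = s.pop(0)
--         if nxt['dv'] == 0 and result[-1]['dv'] == 0:
--             result[-1]['dt'] += nxt['dt']
--         else:
--             result.append(nxt)
--     return result
-- ===== Notes on version B (the rewrite author's own statement) =====
-- stated objective: faster
-- what changed: Replaces A's O(n)-deep recursion, which rebuilds the result with a repeated `l + recursive-call` list concatenation at every non-flat segment, by a single iterative while-loop that appends or merges into one accumulator list.
import Mathlib
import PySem

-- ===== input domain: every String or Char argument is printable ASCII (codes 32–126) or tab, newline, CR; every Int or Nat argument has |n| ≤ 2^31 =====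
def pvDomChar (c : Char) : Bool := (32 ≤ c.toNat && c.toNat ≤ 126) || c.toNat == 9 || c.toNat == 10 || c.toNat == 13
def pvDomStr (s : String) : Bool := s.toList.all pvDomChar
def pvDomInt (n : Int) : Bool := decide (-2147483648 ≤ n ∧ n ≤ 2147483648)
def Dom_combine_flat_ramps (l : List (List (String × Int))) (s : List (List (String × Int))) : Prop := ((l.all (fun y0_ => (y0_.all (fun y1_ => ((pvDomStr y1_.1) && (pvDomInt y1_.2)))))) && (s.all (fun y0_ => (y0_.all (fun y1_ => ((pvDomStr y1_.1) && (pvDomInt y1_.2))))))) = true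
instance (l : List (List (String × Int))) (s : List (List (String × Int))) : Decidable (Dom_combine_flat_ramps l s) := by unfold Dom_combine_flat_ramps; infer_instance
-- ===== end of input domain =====

-- B replaces A's recursion (with its repeated `l + …` concatenations) by one iterative
-- pass appending/merging into an accumulator. Both Pythons pop s and mutate the merged
-- dicts in place; the equivalence proved here is about the RETURN value only.

-- shared dict primitives on the assoc-list representation
-- d[k] (KeyError, i.e. absent key, is excluded by Pre_)
def pyGetItemD (d : List (String × Int)) (k : String) : Int := (PySem.Dict.mk d).getD k 0
-- d[k] += v (position-preserving update; absent key excluded by Pre_)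
def pyAddItem (d : List (String × Int)) (k : String) (v : Int) : List (String × Int) :=
  ((PySem.Dict.mk d).modify k 0 (· + v)).items
-- l[-1] = f(l[-1]) applied functionally: replace the last element
def updLast (f : List (String × Int) → List (String × Int)) :
    List (List (String × Int)) → List (List (String × Int))
  | [] => []
  | [x] => [f x]
  | x :: y :: ys => x :: updLast f (y :: ys)

-- ===== PORT A =====
def combine_flat_ramps (l : List (List (String × Int))) (s : List (List (String × Int))) : List (List (String × Int)) :=
  match l, s with
  | [], [] => []                         -- Python raises IndexError here; excluded by Pre_
  | [], h :: t => combine_flat_ramps [h] t   -- l = [s.pop(0)], then the body continues with nonempty l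
  | x :: xs, [] => x :: xs
  | x :: xs, nxt :: t =>
    if pyGetItemD nxt "dv" = 0 ∧ pyGetItemD ((x :: xs).getLastD []) "dv" = 0 then
      combine_flat_ramps (updLast (fun d => pyAddItem d "dt" (pyGetItemD nxt "dt")) (x :: xs)) t
    else
      (x :: xs) ++ combine_flat_ramps [nxt] t
termination_by 2 * s.length + (if l = [] then 1 else 0)
decreasing_by
  all_goals simp
  all_goals first
    | omega
    | (split <;> omega)

-- ===== PORT B =====
-- the body of Source B's while-loop, as the step of a fold over the popped elements
def stepB (res : List (List (String × Int))) (nxt : List (String × Int)) : List (List (String × Int)) :=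
  if pyGetItemD nxt "dv" = 0 ∧ pyGetItemD (res.getLastD []) "dv" = 0 then
    updLast (fun d => pyAddItem d "dt" (pyGetItemD nxt "dt")) res
  else
    res ++ [nxt]

def combine_flat_ramps_alt (l : List (List (String × Int))) (s : List (List (String × Int))) : List (List (String × Int)) :=
  match l, s with
  | [], [] => []                         -- Source B raises IndexError here; excluded by Pre_
  | [], h :: t => t.foldl stepB [h]      -- l = [s.pop(0)]; result = list(l); while s: …
  | x :: xs, s => s.foldl stepB (x :: xs)

-- ===== PRECONDITION & SPEC =====
-- Pre_ = exactly the inputs where the Python A returns (no IndexError/KeyError): the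
-- merged stream (last of l, then s) is nonempty, every element actually read as nxt has
-- a 'dv' key, the stream head's 'dv' is only read when the second element is flat, and
-- 'dt' keys are needed exactly on adjacent flat (dv = 0) pairs.
def Pre_combine_flat_ramps (l : List (List (String × Int))) (s : List (List (String × Int))) : Prop :=
  (if l = [] then s else l.getLastD [] :: s) ≠ [] ∧
  (∀ d ∈ (if l = [] then s else l.getLastD [] :: s).tail, ((PySem.Dict.mk d).get? "dv").isSome) ∧
  (2 ≤ (if l = [] then s else l.getLastD [] :: s).length →
    ((PySem.Dict.mk ((if l = [] then s else l.getLastD [] :: s).tail.headD [])).get? "dv" = some 0 →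
      ((PySem.Dict.mk ((if l = [] then s else l.getLastD [] :: s).headD [])).get? "dv").isSome)) ∧
  (∀ p ∈ (if l = [] then s else l.getLastD [] :: s).zip (if l = [] then s else l.getLastD [] :: s).tail,
      (PySem.Dict.mk p.1).get? "dv" = some 0 ∧ (PySem.Dict.mk p.2).get? "dv" = some 0 →
      ((PySem.Dict.mk p.1).get? "dt").isSome ∧ ((PySem.Dict.mk p.2).get? "dt").isSome)
instance (l : List (List (String × Int))) (s : List (List (String × Int))) : Decidable (Pre_combine_flat_ramps l s) := by unfold Pre_combine_flat_ramps; infer_instance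

def pvWitness_combine_flat_ramps : (List (List (String × Int))) × (List (List (String × Int))) :=
  ([[("dv", 0), ("dt", 5)]], [[("dv", 0), ("dt", 3)], [("dv", 1), ("dt", 2)]])

def Spec_combine_flat_ramps (l : List (List (String × Int))) (s : List (List (String × Int))) (out : List (List (String × Int))) : Prop := out = combine_flat_ramps_alt l s
instance (l : List (List (String × Int))) (s : List (List (String × Int))) (out : List (List (String × Int))) : Decidable (Spec_combine_flat_ramps l s out) := by unfold Spec_combine_flat_ramps; infer_instance

-- ===== CLAIM (what is proved, stated in full; the proofs are below) =====
def Claim_equal_combine_flat_ramps : Prop := ∀ (l : List (List (String × Int))) (s : List (List (String × Int))), Dom_combine_flat_ramps l s → Pre_combine_flat_ramps l s → Spec_combine_flat_ramps l s (combine_flat_ramps l s)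

-- ===== LEMMAS AND PROOFS =====

theorem updLast_ne_nil (f : List (String × Int) → List (String × Int))
    (L : List (List (String × Int))) (h : L ≠ []) : updLast f L ≠ [] := by
  match L with
  | [x] => simp [updLast]
  | x :: y :: ys => simp [updLast]

theorem updLast_append (f : List (String × Int) → List (String × Int))
    (l r : List (List (String × Int))) (h : r ≠ []) :
    updLast f (l ++ r) = l ++ updLast f r := by
  induction l with
  | nil => rfl
  | cons a l ih =>
    cases hl : l ++ r with
    | nil => exact absurd (List.append_eq_nil_iff.mp hl).2 h
    | cons b m =>
      rw [List.cons_append, hl, updLast, ← hl, ih, List.cons_append]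

theorem getLastD_append_right (l r : List (List (String × Int)))
    (h : r ≠ []) : (l ++ r).getLastD [] = r.getLastD [] := by
  rw [List.getLastD_eq_getLast?, List.getLastD_eq_getLast?]
  rw [List.getLast?_append_of_ne_nil]
  exact h

theorem foldl_stepB_append (t : List (List (String × Int)))
    (l r : List (List (String × Int))) (h : r ≠ []) :
    t.foldl stepB (l ++ r) = l ++ t.foldl stepB r := by
  induction t generalizing r with
  | nil => rfl
  | cons a t ih =>
    simp only [List.foldl_cons]
    have hg : (l ++ r).getLastD [] = r.getLastD [] := getLastD_append_right l r h
    by_cases hc : pyGetItemD a "dv" = 0 ∧ pyGetItemD (r.getLastD []) "dv" = 0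
    · have h1 : stepB (l ++ r) a = l ++ updLast (fun d => pyAddItem d "dt" (pyGetItemD a "dt")) r := by
        simp only [stepB, hg, if_pos hc]; exact updLast_append _ l r h
      have h2 : stepB r a = updLast (fun d => pyAddItem d "dt" (pyGetItemD a "dt")) r := by
        simp only [stepB, if_pos hc]
      rw [h1, h2]; exact ih _ (updLast_ne_nil _ r h)
    · have h1 : stepB (l ++ r) a = l ++ (r ++ [a]) := by
        simp only [stepB, hg, if_neg hc]; simp
      have h2 : stepB r a = r ++ [a] := by
        simp only [stepB, if_neg hc]
      rw [h1, h2]; exact ih _ (by simp)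

theorem combine_eq_foldl (s l : List (List (String × Int))) (h : l ≠ []) :
    combine_flat_ramps l s = s.foldl stepB l := by
  induction s generalizing l with
  | nil =>
    match l with
    | x :: xs => simp only [combine_flat_ramps, List.foldl_nil]
  | cons nxt t ih =>
    match l with
    | x :: xs =>
      rw [combine_flat_ramps, List.foldl_cons, stepB]
      split
      · exact ih _ (updLast_ne_nil _ _ (by simp))
      · rw [ih [nxt] (by simp), foldl_stepB_append t (x :: xs) [nxt] (by simp)]

-- ===== VERDICT (by name: the statement is the Claim_ definition above) =====
theorem combine_flat_ramps_spec : Claim_equal_combine_flat_ramps := by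
  intro l s _ _
  unfold Spec_combine_flat_ramps
  match l, s with
  | [], [] => simp only [combine_flat_ramps, combine_flat_ramps_alt]
  | [], h :: t =>
    rw [combine_flat_ramps, combine_flat_ramps_alt]
    exact combine_eq_foldl t [h] (by simp)
  | x :: xs, s =>
    rw [combine_flat_ramps_alt]
    exact combine_eq_foldl s (x :: xs) (by simp)
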